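-- pv_equiv track=rewrite | github.com/sanjaynboopalan/mechkee-ai | backend/app/core/query_processor.py | _suggest_filters
-- ===== SOURCE A (Python) =====
-- from typing import List, Dict, Any, Optional, Tuple
--
-- def _suggest_filters(query: str) -> Dict[str, Any]:
--     """Suggest search filters based on query"""
--     filters = {}
--     query_lower = query.lower()
--
--     # Time-based filters
--     if 'recent' in query_lower or 'latest' in query_lower:
--         filters['time_range'] = 'recent'
--     elif any(year in query_lower for year in ['2023', '2024']):
--         filters['time_range'] = 'year_specific'
--
--     # Content type filters
--     if any(word in query_lower for word in ['tutorial', 'guide', 'how to']):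
--         filters['content_type'] = 'tutorial'
--     elif any(word in query_lower for word in ['news', 'article']):
--         filters['content_type'] = 'news'
--     elif any(word in query_lower for word in ['research', 'study', 'paper']):
--         filters['content_type'] = 'academic'
--
--     # Domain filters
--     if any(word in query_lower for word in ['programming', 'code', 'development']):
--         filters['domain'] = 'technology'
--     elif any(word in query_lower for word in ['business', 'market', 'finance']):
--         filters['domain'] = 'business'
--     elif any(word in query_lower for word in ['health', 'medical', 'medicine']):
--         filters['domain'] = 'health'
--
--     return filters
-- ===== SOURCE B (Python) =====
-- # Flat keyword->filter pass: every keyword is tested once; dict.setdefault keeps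
-- # the first (highest-priority) value per category, so no per-category branching
-- # or break is needed.
-- _KEYWORDS = [
--     ("recent", "time_range", "recent"),
--     ("latest", "time_range", "recent"),
--     ("2023", "time_range", "year_specific"),
--     ("2024", "time_range", "year_specific"),
--     ("tutorial", "content_type", "tutorial"),
--     ("guide", "content_type", "tutorial"),
--     ("how to", "content_type", "tutorial"),
--     ("news", "content_type", "news"),
--     ("article", "content_type", "news"),
--     ("research", "content_type", "academic"),
--     ("study", "content_type", "academic"),
--     ("paper", "content_type", "academic"),
--     ("programming", "domain", "technology"),
--     ("code", "domain", "technology"),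
--     ("development", "domain", "technology"),
--     ("business", "domain", "business"),
--     ("market", "domain", "business"),
--     ("finance", "domain", "business"),
--     ("health", "domain", "health"),
--     ("medical", "domain", "health"),
--     ("medicine", "domain", "health"),
-- ]
--
--
-- def _suggest_filters(query: str):
--     """Suggest search filters based on query (flat keyword scan)."""
--     q = query.lower()
--     filters = {}
--     for kw, cat, val in _KEYWORDS:
--         if kw in q:
--             filters.setdefault(cat, val)
--     return filters
-- ===== Notes on version B (the rewrite author's own statement) =====
-- stated objective: alternative
-- what changed: Replaces the three if/elif chains with their any()-tests by one flat pass over individual (keyword, category, value) triples using dict.setdefault, so every keyword is tested and first-match priority comes from list order plus setdefault rather than branching and short-circuiting.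
import Mathlib
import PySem

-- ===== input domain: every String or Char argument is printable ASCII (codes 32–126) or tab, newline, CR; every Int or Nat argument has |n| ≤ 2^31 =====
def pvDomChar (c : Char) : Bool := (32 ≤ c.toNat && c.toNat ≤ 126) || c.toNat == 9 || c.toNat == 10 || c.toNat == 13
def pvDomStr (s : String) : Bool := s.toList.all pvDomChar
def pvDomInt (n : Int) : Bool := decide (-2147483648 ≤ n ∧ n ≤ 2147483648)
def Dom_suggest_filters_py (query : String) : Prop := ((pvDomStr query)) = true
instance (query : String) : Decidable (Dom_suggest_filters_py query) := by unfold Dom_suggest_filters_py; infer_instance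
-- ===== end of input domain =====

-- B replaces A's per-category if/elif chains by one flat setdefault pass over individual keywords (alternative decomposition; same cost).


-- ===== PORT A =====
def suggest_filters_py (query : String) : List (String × String) :=
  let filters : PySem.Dict String String := PySem.Dict.empty
  let ql := PySem.Str.lower query
  -- Time-based filters
  let filters :=
    if PySem.Str.isIn "recent" ql || PySem.Str.isIn "latest" ql then
      PySem.Dict.insert filters "time_range" "recent"
    else if (["2023", "2024"] : List String).any (fun year => PySem.Str.isIn year ql) then
      PySem.Dict.insert filters "time_range" "year_specific"
    else filters
  -- Content type filters
  let filters :=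
    if (["tutorial", "guide", "how to"] : List String).any (fun word => PySem.Str.isIn word ql) then
      PySem.Dict.insert filters "content_type" "tutorial"
    else if (["news", "article"] : List String).any (fun word => PySem.Str.isIn word ql) then
      PySem.Dict.insert filters "content_type" "news"
    else if (["research", "study", "paper"] : List String).any (fun word => PySem.Str.isIn word ql) then
      PySem.Dict.insert filters "content_type" "academic"
    else filters
  -- Domain filters
  let filters :=
    if (["programming", "code", "development"] : List String).any (fun word => PySem.Str.isIn word ql) then
      PySem.Dict.insert filters "domain" "technology"
    else if (["business", "market", "finance"] : List String).any (fun word => PySem.Str.isIn word ql) then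
      PySem.Dict.insert filters "domain" "business"
    else if (["health", "medical", "medicine"] : List String).any (fun word => PySem.Str.isIn word ql) then
      PySem.Dict.insert filters "domain" "health"
    else filters
  filters.items

-- ===== PORT B =====
-- Source B's flat (keyword, category, value) list
def pvKeywords : List (String × String × String) :=
  [("recent", "time_range", "recent"),
   ("latest", "time_range", "recent"),
   ("2023", "time_range", "year_specific"),
   ("2024", "time_range", "year_specific"),
   ("tutorial", "content_type", "tutorial"),
   ("guide", "content_type", "tutorial"),
   ("how to", "content_type", "tutorial"),
   ("news", "content_type", "news"),
   ("article", "content_type", "news"),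
   ("research", "content_type", "academic"),
   ("study", "content_type", "academic"),
   ("paper", "content_type", "academic"),
   ("programming", "domain", "technology"),
   ("code", "domain", "technology"),
   ("development", "domain", "technology"),
   ("business", "domain", "business"),
   ("market", "domain", "business"),
   ("finance", "domain", "business"),
   ("health", "domain", "health"),
   ("medical", "domain", "health"),
   ("medicine", "domain", "health")]

def suggest_filters_py_alt (query : String) : List (String × String) :=
  let q := PySem.Str.lower query
  (pvKeywords.foldl
    (fun d t => if PySem.Str.isIn t.1 q then d.setdefault t.2.1 t.2.2 else d)
    (PySem.Dict.empty : PySem.Dict String String)).items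

-- ===== PRECONDITION & SPEC =====
def Spec_suggest_filters_py (query : String) (out : List (String × String)) : Prop := out = suggest_filters_py_alt query
instance (query : String) (out : List (String × String)) : Decidable (Spec_suggest_filters_py query out) := by unfold Spec_suggest_filters_py; infer_instance

-- ===== CLAIM (what is proved, stated in full; the proofs are below) =====
def Claim_equal_suggest_filters_py : Prop := ∀ (query : String), Dom_suggest_filters_py query → Spec_suggest_filters_py query (suggest_filters_py query)

-- ===== LEMMAS AND PROOFS =====

-- once a category key is present, the whole rest of its segment is a no-op
lemma pv_foldl_skip (q c : String) (seg : List (String × String × String))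
    (d : PySem.Dict String String)
    (hall : ∀ t ∈ seg, t.2.1 = c) (h : d.contains c = true) :
    seg.foldl (fun d t => if PySem.Str.isIn t.1 q then d.setdefault t.2.1 t.2.2 else d) d = d := by
  induction seg generalizing d with
  | nil => rfl
  | cons t rest ih =>
    have hc : t.2.1 = c := hall t (by simp)
    simp only [List.foldl_cons]
    by_cases hi : PySem.Str.isIn t.1 q
    · rw [if_pos hi, hc, PySem.Dict.setdefault_of_contains _ _ h]
      exact ih _ (fun t ht => hall t (List.mem_cons_of_mem _ ht)) h
    · rw [if_neg hi]
      exact ih _ (fun t ht => hall t (List.mem_cons_of_mem _ ht)) h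

-- a segment with one category key behaves as first-match-wins
lemma pv_foldl_seg (q c : String) (seg : List (String × String × String))
    (d : PySem.Dict String String)
    (hall : ∀ t ∈ seg, t.2.1 = c) (h : d.contains c = false) :
    seg.foldl (fun d t => if PySem.Str.isIn t.1 q then d.setdefault t.2.1 t.2.2 else d) d
    = match seg.find? (fun t => PySem.Str.isIn t.1 q) with
      | some t => d.insert c t.2.2
      | none => d := by
  induction seg generalizing d with
  | nil => rfl
  | cons t rest ih =>
    have hc : t.2.1 = c := hall t (by simp)
    simp only [List.foldl_cons, List.find?_cons]
    by_cases hi : PySem.Str.isIn t.1 q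
    · rw [if_pos hi, hc, PySem.Dict.setdefault_of_not_contains _ _ h, hi]
      simp only []
      exact pv_foldl_skip q c rest _ (fun t ht => hall t (List.mem_cons_of_mem _ ht))
        (PySem.Dict.contains_insert_self _ _ _)
    · rw [if_neg hi]
      have hf : (PySem.Str.isIn t.1 q) = false := by rwa [Bool.not_eq_true] at hi
      rw [hf]
      exact ih _ (fun t ht => hall t (List.mem_cons_of_mem _ ht)) h

-- concrete segments of pvKeywords (proof-only names)
def pvSegT : List (String × String × String) :=
  [("recent", "time_range", "recent"),
   ("latest", "time_range", "recent"),
   ("2023", "time_range", "year_specific"),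
   ("2024", "time_range", "year_specific")]

def pvSegC : List (String × String × String) :=
  [("tutorial", "content_type", "tutorial"),
   ("guide", "content_type", "tutorial"),
   ("how to", "content_type", "tutorial"),
   ("news", "content_type", "news"),
   ("article", "content_type", "news"),
   ("research", "content_type", "academic"),
   ("study", "content_type", "academic"),
   ("paper", "content_type", "academic")]

def pvSegD : List (String × String × String) :=
  [("programming", "domain", "technology"),
   ("code", "domain", "technology"),
   ("development", "domain", "technology"),
   ("business", "domain", "business"),
   ("market", "domain", "business"),
   ("finance", "domain", "business"),
   ("health", "domain", "health"),
   ("medical", "domain", "health"),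
   ("medicine", "domain", "health")]

lemma pv_split : pvKeywords = pvSegT ++ (pvSegC ++ pvSegD) := rfl

lemma pv_stepT (ql : String) (d : PySem.Dict String String)
    (h : d.contains "time_range" = false) :
    pvSegT.foldl (fun d t => if PySem.Str.isIn t.1 ql then d.setdefault t.2.1 t.2.2 else d) d
    = (if PySem.Str.isIn "recent" ql || PySem.Str.isIn "latest" ql then
        PySem.Dict.insert d "time_range" "recent"
      else if (["2023", "2024"] : List String).any (fun year => PySem.Str.isIn year ql) then
        PySem.Dict.insert d "time_range" "year_specific"
      else d) := by
  rw [pv_foldl_seg ql "time_range" pvSegT d (by decide) h]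
  simp only [pvSegT, List.find?, List.any_cons, List.any_nil, Bool.or_false]
  cases h1 : PySem.Str.isIn "recent" ql <;>
    cases h2 : PySem.Str.isIn "latest" ql <;>
    cases h3 : PySem.Str.isIn "2023" ql <;>
    cases h4 : PySem.Str.isIn "2024" ql <;>
    rfl

lemma pv_stepC (ql : String) (d : PySem.Dict String String)
    (h : d.contains "content_type" = false) :
    pvSegC.foldl (fun d t => if PySem.Str.isIn t.1 ql then d.setdefault t.2.1 t.2.2 else d) d
    = (if (["tutorial", "guide", "how to"] : List String).any (fun word => PySem.Str.isIn word ql) then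
        PySem.Dict.insert d "content_type" "tutorial"
      else if (["news", "article"] : List String).any (fun word => PySem.Str.isIn word ql) then
        PySem.Dict.insert d "content_type" "news"
      else if (["research", "study", "paper"] : List String).any (fun word => PySem.Str.isIn word ql) then
        PySem.Dict.insert d "content_type" "academic"
      else d) := by
  rw [pv_foldl_seg ql "content_type" pvSegC d (by decide) h]
  simp only [pvSegC, List.find?, List.any_cons, List.any_nil, Bool.or_false]
  cases h1 : PySem.Str.isIn "tutorial" ql <;>
    cases h2 : PySem.Str.isIn "guide" ql <;>
    cases h3 : PySem.Str.isIn "how to" ql <;>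
    cases h4 : PySem.Str.isIn "news" ql <;>
    cases h5 : PySem.Str.isIn "article" ql <;>
    cases h6 : PySem.Str.isIn "research" ql <;>
    cases h7 : PySem.Str.isIn "study" ql <;>
    cases h8 : PySem.Str.isIn "paper" ql <;>
    rfl

lemma pv_stepD (ql : String) (d : PySem.Dict String String)
    (h : d.contains "domain" = false) :
    pvSegD.foldl (fun d t => if PySem.Str.isIn t.1 ql then d.setdefault t.2.1 t.2.2 else d) d
    = (if (["programming", "code", "development"] : List String).any (fun word => PySem.Str.isIn word ql) then
        PySem.Dict.insert d "domain" "technology"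
      else if (["business", "market", "finance"] : List String).any (fun word => PySem.Str.isIn word ql) then
        PySem.Dict.insert d "domain" "business"
      else if (["health", "medical", "medicine"] : List String).any (fun word => PySem.Str.isIn word ql) then
        PySem.Dict.insert d "domain" "health"
      else d) := by
  rw [pv_foldl_seg ql "domain" pvSegD d (by decide) h]
  simp only [pvSegD, List.find?, List.any_cons, List.any_nil, Bool.or_false]
  cases h1 : PySem.Str.isIn "programming" ql <;>
    cases h2 : PySem.Str.isIn "code" ql <;>
    cases h3 : PySem.Str.isIn "development" ql <;>
    cases h4 : PySem.Str.isIn "business" ql <;>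
    cases h5 : PySem.Str.isIn "market" ql <;>
    cases h6 : PySem.Str.isIn "finance" ql <;>
    cases h7 : PySem.Str.isIn "health" ql <;>
    cases h8 : PySem.Str.isIn "medical" ql <;>
    cases h9 : PySem.Str.isIn "medicine" ql <;>
    rfl

-- ===== VERDICT (by name: the statement is the Claim_ definition above) =====
theorem suggest_filters_py_spec : Claim_equal_suggest_filters_py := by
  intro query _
  unfold Spec_suggest_filters_py suggest_filters_py suggest_filters_py_alt
  simp only []
  rw [pv_split, List.foldl_append, List.foldl_append,
      pv_stepT _ _ (PySem.Dict.contains_empty _)]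
  rw [pv_stepC]
  · rw [pv_stepD]
    split_ifs <;> simp [PySem.Dict.contains_insert, PySem.Dict.contains_empty]
  · split_ifs <;> simp [PySem.Dict.contains_insert, PySem.Dict.contains_empty]
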